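-- pv_equiv track=rewrite | github.com/sky-butterfly/coding-test | 프로그래머스/Level_0/수 조작하기 2.py | solution
-- ===== SOURCE A (Python) =====
-- def solution(numLog):
--     answer = ''
--
--     before = numLog[0]
--     for n in numLog:
--         if (n - before) == 1:
--             answer += 'w'
--         elif (before - n ) == 1:
--             answer += 's'
--         elif n - before == 10:
--             answer += 'd'
--         elif before - n == 10:
--             answer += 'a'
--
--         before = n
--         continue
--
--     return answer
-- ===== SOURCE B (Python) =====
-- _TABLE = {1: 'w', -1: 's', 10: 'd', -10: 'a'}
--
-- def solution(numLog):
--     n = len(numLog)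
--
--     # divide and conquer on index ranges: letters for the consecutive pairs
--     # (i, i+1) with lo <= i < hi; correctness: concatenation of the per-pair
--     # letters is associative, so any split order yields the same string
--     def go(lo, hi):
--         if hi - lo <= 0:
--             return ''
--         if hi - lo == 1:
--             return _TABLE.get(numLog[lo + 1] - numLog[lo], '')
--         mid = (lo + hi) // 2
--         return go(lo, mid) + go(mid, hi)
--
--     return go(0, n - 1)
-- ===== Notes on version B (the rewrite author's own statement) =====
-- stated objective: alternative
-- what changed: Replaces A's single stateful left-to-right scan (accumulator string + 'before' variable, four-way if/elif) by a divide-and-conquer recursion on index ranges: the pair-letter string for [lo,hi) is computed by splitting at the midpoint and concatenating the two halves, with a constant diff-to-letter dict at the leaves; correct because per-pair letters are independent and concatenation is associative.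
import Mathlib
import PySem

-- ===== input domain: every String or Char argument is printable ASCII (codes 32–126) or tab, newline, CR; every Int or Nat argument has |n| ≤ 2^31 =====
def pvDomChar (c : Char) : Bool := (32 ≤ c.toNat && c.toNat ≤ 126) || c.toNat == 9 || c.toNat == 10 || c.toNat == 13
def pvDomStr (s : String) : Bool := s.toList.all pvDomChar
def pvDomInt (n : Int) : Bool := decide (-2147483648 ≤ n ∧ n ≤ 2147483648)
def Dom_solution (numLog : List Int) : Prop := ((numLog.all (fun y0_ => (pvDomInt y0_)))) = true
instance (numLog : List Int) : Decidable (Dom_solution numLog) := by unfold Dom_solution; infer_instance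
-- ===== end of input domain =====

-- B replaces A's stateful left-to-right scan by a divide-and-conquer recursion on index
-- ranges with a constant diff→letter dict at the leaves; on the empty list, where A raises
-- IndexError, B returns "".

-- ===== PORT A =====
-- one loop step: the four-way if/elif chain appending to answer, then before := n
def pvStepA (st : String × Int) (n : Int) : String × Int :=
  let answer := st.1
  let before := st.2
  let answer :=
    if n - before = 1 then answer ++ "w"
    else if before - n = 1 then answer ++ "s"
    else if n - before = 10 then answer ++ "d"
    else if before - n = 10 then answer ++ "a"
    else answer
  (answer, n)

def solution (numLog : List Int) : String :=
  match numLog with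
  | [] => ""   -- Python raises IndexError reading the first element here; excluded by Pre_solution
  | b0 :: _ => (numLog.foldl pvStepA ("", b0)).1

-- ===== PORT B =====
def pvTable : PySem.Dict Int String :=
  PySem.Dict.ofList [(1, "w"), (-1, "s"), (10, "d"), (-10, "a")]

-- go(lo, hi) from Source B; the extra Nat argument is ONLY a totality fuel (the Python
-- recursion always terminates since each half of a range of length ≥ 2 is strictly shorter)
def pvGo (xs : List Int) : Nat → Int → Int → String
  | 0, _, _ => ""   -- unreachable: fuel ≥ hi - lo always holds at every call
  | fuel + 1, lo, hi =>
    if hi - lo ≤ 0 then ""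
    else if hi - lo = 1 then
      PySem.Dict.getD pvTable
        ((PySem.List.pyGet? xs (lo + 1)).getD 0 - (PySem.List.pyGet? xs lo).getD 0) ""
    else
      let mid := PySem.Int.floordiv (lo + hi) 2
      pvGo xs fuel lo mid ++ pvGo xs fuel mid hi

def solution_alt (numLog : List Int) : String :=
  pvGo numLog (numLog.length + 1) 0 ((numLog.length : Int) - 1)

-- ===== PRECONDITION & SPEC =====
-- Pre_ excludes only the empty list, on which A raises IndexError reading its first element.
def Pre_solution (numLog : List Int) : Prop := numLog ≠ []
instance (numLog : List Int) : Decidable (Pre_solution numLog) := by unfold Pre_solution; infer_instance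
def pvWitness_solution : List Int := ([0, 1, 0, 10, 0])

def Spec_solution (numLog : List Int) (out : String) : Prop := out = solution_alt numLog
instance (numLog : List Int) (out : String) : Decidable (Spec_solution numLog out) := by unfold Spec_solution; infer_instance

-- ===== CLAIM (what is proved, stated in full; the proofs are below) =====
def Claim_equal_solution : Prop := ∀ (numLog : List Int), Dom_solution numLog → Pre_solution numLog → Spec_solution numLog (solution numLog)

-- ===== LEMMAS AND PROOFS =====

-- the letter assigned to a difference, as an if-chain (common form of both sides)
def pvChar (d : Int) : String :=
  if d = 1 then "w" else if d = -1 then "s" else if d = 10 then "d"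
  else if d = -10 then "a" else ""

-- the letter of the pair starting at index i
def pvF (xs : List Int) (i : Nat) : String :=
  pvChar ((PySem.List.pyGet? xs ((i : Int) + 1)).getD 0 - (PySem.List.pyGet? xs (i : Int)).getD 0)

lemma getD_pvTable (d : Int) : PySem.Dict.getD pvTable d "" = pvChar d := by
  have h : pvTable = PySem.Dict.mk [(1, "w"), (-1, "s"), (10, "d"), (-10, "a")] := by decide
  rw [h, PySem.Dict.getD_eq_get?_getD]
  unfold pvChar
  simp only [PySem.Dict.get?_mk_cons, beq_iff_eq]
  split_ifs <;> first | rfl | omega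

lemma stepA_eq (acc : String) (before n : Int) :
    pvStepA (acc, before) n = (acc ++ pvChar (n - before), n) := by
  have e1 : (before - n = 1) ↔ (n - before = -1) := by omega
  have e2 : (before - n = 10) ↔ (n - before = -10) := by omega
  unfold pvStepA pvChar
  simp only [e1, e2]
  split_ifs <;> simp_all

lemma join_foldl (l : List String) : ∀ (a : String),
    List.foldl (fun r s => r ++ s) a l = a ++ List.foldl (fun r s => r ++ s) "" l := by
  induction l with
  | nil => intro a; simp
  | cons x t ih => intro a; simp only [List.foldl_cons]; rw [ih, ih ("" ++ x)]; simp [String.append_assoc]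

lemma join_cons (a : String) (l : List String) :
    String.join (a :: l) = a ++ String.join l := by
  simp only [String.join, List.foldl_cons]
  rw [join_foldl]
  simp

lemma join_append (l1 l2 : List String) :
    String.join (l1 ++ l2) = String.join l1 ++ String.join l2 := by
  induction l1 with
  | nil => simp [String.join]
  | cons a t ih => simp only [List.cons_append, join_cons, ih, String.append_assoc]

-- A's loop computes the join of the per-pair letters, left to right
lemma foldl_stepA (l : List Int) : ∀ (before : Int) (acc : String),
    (l.foldl pvStepA (acc, before)).1 =
      acc ++ String.join (((before :: l).zip l).map (fun p => pvChar (p.2 - p.1))) := by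
  induction l with
  | nil => intro before acc; simp [String.join]
  | cons n t ih =>
    intro before acc
    simp only [List.foldl_cons, stepA_eq, List.zip_cons_cons, List.map_cons, join_cons]
    rw [ih n]
    simp [String.append_assoc]

-- B's recursion computes the join of the per-pair letters of the index range [lo, hi)
lemma pvGo_eq (xs : List Int) : ∀ (fuel : Nat) (lo hi : Int), 0 ≤ lo → (hi - lo).toNat ≤ fuel →
    pvGo xs fuel lo hi = String.join ((List.range' lo.toNat (hi - lo).toNat).map (pvF xs)) := by
  intro fuel
  induction fuel with
  | zero =>
    intro lo hi _ hf
    have : (hi - lo).toNat = 0 := Nat.le_zero.mp hf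
    simp [pvGo, this, String.join]
  | succ fuel ih =>
    intro lo hi hlo hf
    by_cases h0 : hi - lo ≤ 0
    · have : (hi - lo).toNat = 0 := by omega
      simp [pvGo, h0, this, String.join]
    · by_cases h1 : hi - lo = 1
      · have ht : (hi - lo).toNat = 1 := by omega
        have hc : ((lo.toNat : Int)) = lo := Int.toNat_of_nonneg hlo
        simp only [pvGo, if_neg h0, if_pos h1, ht, List.range'_one, List.map_cons,
          List.map_nil, String.join, getD_pvTable, pvF, hc]
        simp
      · have h2 : 2 ≤ hi - lo := by omega
        have hmid : lo < PySem.Int.floordiv (lo + hi) 2 ∧ PySem.Int.floordiv (lo + hi) 2 < hi := by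
          rw [PySem.Int.floordiv_eq_ediv_of_pos (by norm_num)]
          omega
        set mid := PySem.Int.floordiv (lo + hi) 2 with hm
        have hsplit : List.range' lo.toNat (hi - lo).toNat =
            List.range' lo.toNat (mid - lo).toNat ++ List.range' mid.toNat (hi - mid).toNat := by
          have e1 : lo.toNat + (mid - lo).toNat = mid.toNat := by omega
          have e2 : (mid - lo).toNat + (hi - mid).toNat = (hi - lo).toNat := by omega
          rw [← e2, ← List.range'_append_1, e1]
        simp only [pvGo, if_neg h0, if_neg h1]
        rw [← hm, ih lo mid (by omega) (by omega), ih mid hi (by omega) (by omega),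
          hsplit, List.map_append, join_append]

-- the pair letters of the whole list, zip form = index form
lemma zip_eq_range (xs : List Int) :
    ((xs.zip xs.tail).map (fun p => pvChar (p.2 - p.1))) =
      (List.range' 0 (xs.length - 1)).map (pvF xs) := by
  apply List.ext_getElem
  · simp only [List.length_map, List.length_zip, List.length_tail, List.length_range']
    omega
  · intro i h1 h2
    simp only [List.getElem_map, List.getElem_zip, List.getElem_range']
    have hlen : i + 1 < xs.length := by
      simp at h2; omega
    have htail : xs.tail[i]'(by simp; omega) = xs[i + 1] := by
      simp [List.getElem_tail]
    rw [htail]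
    unfold pvF
    have e1 : ((0 + 1 * i : Nat) : Int) = (i : Int) := by omega
    have e2 : (i : Int) + 1 = ((i + 1 : Nat) : Int) := by omega
    rw [e1, e2, PySem.List.pyGet?_natCast, List.getElem?_eq_getElem hlen]
    simp [List.getElem?_eq_getElem (Nat.lt_of_succ_lt hlen)]

-- ===== VERDICT (by name: the statement is the Claim_ definition above) =====
theorem solution_spec : Claim_equal_solution := by
  intro numLog _ hpre
  unfold Spec_solution solution solution_alt
  match numLog with
  | [] => exact absurd rfl hpre
  | b0 :: t =>
    simp only
    rw [foldl_stepA,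
      pvGo_eq (b0 :: t) ((b0 :: t).length + 1) 0 (((b0 :: t).length : Int) - 1) le_rfl (by omega)]
    have h1 : ((((b0 :: t).length : Int) - 1) - 0).toNat = (b0 :: t).length - 1 := by
      omega
    have h2 : (0 : Int).toNat = 0 := rfl
    rw [h1, h2, ← zip_eq_range]
    simp [List.zip_cons_cons, join_cons, pvChar]
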